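-- pv_equiv track=rewrite | github.com/Annarhysa/Codes | DSA/arrays/python/mountain_exploration.py | find_highest_peaks
-- ===== SOURCE A (Python) =====
-- def find_highest_peaks(heights):
--     # Ensure there are at least three elements in the list
--     if len(heights) < 3:
--         return "Invalid Input"
--
--     # Validate input data types
--     if not all(isinstance(height, int) for height in heights):
--         return "Input was not in a correct format"
--
--     # Identify peaks
--     peaks = []
--     for i in range(1, len(heights) - 1):
--         if heights[i] > heights[i - 1] and heights[i] > heights[i + 1]:
--             peaks.append(heights[i])
--
--     # Determine the highest peak
--     if peaks:
--         highest_peak = max(peaks)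
--         highest_peaks_count = peaks.count(highest_peak)
--
--         return highest_peaks_count, [highest_peak] * highest_peaks_count
--     else:
--         return 0, []
-- ===== SOURCE B (Python) =====
-- def find_highest_peaks(heights):
--     if len(heights) < 3:
--         return "Invalid Input"
--     if not all(isinstance(height, int) for height in heights):
--         return "Input was not in a correct format"
--     # single pass: keep the running highest peak and its multiplicity
--     highest = None
--     count = 0
--     for i in range(1, len(heights) - 1):
--         h = heights[i]
--         if h > heights[i - 1] and h > heights[i + 1]:
--             if highest is None or h > highest:
--                 highest, count = h, 1
--             elif h == highest:
--                 count += 1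
--     if count == 0:
--         return 0, []
--     return count, [highest] * count
-- ===== Notes on version B (the rewrite author's own statement) =====
-- stated objective: simpler
-- what changed: B replaces A's three phases (build a peaks list, take max of it, count the max) by one accumulator pass that keeps the running highest peak and its multiplicity, never materialising the peaks list.
-- outside the precondition, e.g. on find_highest_peaks([1, 2]): A returns 'Invalid Input', B returns 'Invalid Input'
import Mathlib
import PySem

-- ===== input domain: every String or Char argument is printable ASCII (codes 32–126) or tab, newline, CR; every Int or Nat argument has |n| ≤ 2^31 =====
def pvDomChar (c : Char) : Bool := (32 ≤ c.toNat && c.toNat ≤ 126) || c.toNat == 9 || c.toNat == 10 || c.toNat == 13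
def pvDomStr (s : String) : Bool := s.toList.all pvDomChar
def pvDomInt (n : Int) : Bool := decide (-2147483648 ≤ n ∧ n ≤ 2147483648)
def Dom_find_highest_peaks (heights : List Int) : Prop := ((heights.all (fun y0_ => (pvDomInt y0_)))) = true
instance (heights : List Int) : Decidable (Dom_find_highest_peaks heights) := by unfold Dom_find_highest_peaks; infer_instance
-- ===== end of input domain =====

-- B collapses A's peaks-list + max + count into one running (highest, count) accumulator pass; objective: simpler.
-- ===== PORT A =====
-- The isinstance check of A is always true for a List Int argument.
-- Indices i-1, i, i+1 are in range for every i of the loop, so pyGetD with default 0 is exact.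
def find_highest_peaks (heights : List Int) : Int × List Int :=
  let peaks := (PySem.List.pyRange 1 ((heights.length : Int) - 1) 1).foldl
    (fun acc i =>
      if PySem.List.pyGetD heights i 0 > PySem.List.pyGetD heights (i - 1) 0 ∧
         PySem.List.pyGetD heights i 0 > PySem.List.pyGetD heights (i + 1) 0
      then acc ++ [PySem.List.pyGetD heights i 0] else acc) []
  match PySem.List.max? peaks (fun x => x) with
  | some highest_peak =>
      let highest_peaks_count := PySem.List.count peaks highest_peak
      ((highest_peaks_count : Int), List.replicate highest_peaks_count highest_peak)
  | none => (0, [])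

-- ===== PORT B =====
-- one step of B's accumulator: None → first peak; strictly higher → reset; equal → bump count
def fhpStep (st : Option (Int × Int)) (h : Int) : Option (Int × Int) :=
  match st with
  | none => some (h, 1)
  | some (hi, c) => if h > hi then some (h, 1) else if h = hi then some (hi, c + 1) else some (hi, c)

def find_highest_peaks_alt (heights : List Int) : Int × List Int :=
  let st := (PySem.List.pyRange 1 ((heights.length : Int) - 1) 1).foldl
    (fun st i =>
      let h := PySem.List.pyGetD heights i 0
      if h > PySem.List.pyGetD heights (i - 1) 0 ∧ h > PySem.List.pyGetD heights (i + 1) 0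
      then fhpStep st h else st) none
  match st with
  | none => (0, [])
  | some (hi, c) => (c, List.replicate c.toNat hi)

-- ===== PRECONDITION & SPEC =====
-- Pre_ excludes len(heights) < 3, where A returns the string "Invalid Input" instead of a (count, list) pair.
def Pre_find_highest_peaks (heights : List Int) : Prop := 3 ≤ heights.length
instance (heights : List Int) : Decidable (Pre_find_highest_peaks heights) := by unfold Pre_find_highest_peaks; infer_instance
def pvWitness_find_highest_peaks : List Int := [1, 2, 1]
def Spec_find_highest_peaks (heights : List Int) (out : Int × List Int) : Prop := out = find_highest_peaks_alt heights
instance (heights : List Int) (out : Int × List Int) : Decidable (Spec_find_highest_peaks heights out) := by unfold Spec_find_highest_peaks; infer_instance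

-- ===== CLAIM (what is proved, stated in full; the proofs are below) =====
def Claim_equal_find_highest_peaks : Prop := ∀ (heights : List Int), Dom_find_highest_peaks heights → Pre_find_highest_peaks heights → Spec_find_highest_peaks heights (find_highest_peaks heights)

-- ===== LEMMAS AND PROOFS =====

-- B's conditional fold over the indices = folding fhpStep over the filter-map list that A builds
theorem fhp_foldl_if_step {α β γ : Type} (p : α → Prop) [DecidablePred p] (f : α → β) (g : γ → β → γ) :
    ∀ (l : List α) (st : γ),
      l.foldl (fun st x => if p x then g st (f x) else st) st
        = ((l.filter (fun x => decide (p x))).map f).foldl g st := by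
  intro l
  induction l with
  | nil => intro st; simp
  | cons x t ih =>
      intro st
      by_cases hx : p x <;> simp [hx, ih]

-- running fhpStep from some (hi, c): the first component becomes the running max,
-- the second counts the occurrences of that max (plus c if the max stayed hi)
theorem fhpStep_run : ∀ (p : List Int) (hi c : Int),
    p.foldl fhpStep (some (hi, c))
      = some (p.foldl max hi,
              (if p.foldl max hi = hi then c else 0) + (p.count (p.foldl max hi) : Int)) := by
  intro p
  induction p with
  | nil => intro hi c; simp
  | cons x t ih =>
      intro hi c
      rcases lt_trichotomy hi x with hlt | heq | hgt
      · have hM : x ≤ t.foldl max x := (PySem.List.le_foldl_max t x).1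
        have hmax : max hi x = x := max_eq_right hlt.le
        have hstep : fhpStep (some (hi, c)) x = some (x, 1) := by simp [fhpStep, hlt]
        simp only [List.foldl_cons, hstep, ih, hmax, List.count_cons, beq_iff_eq,
          Option.some.injEq, Prod.mk.injEq]
        refine ⟨trivial, ?_⟩
        split_ifs <;> push_cast <;> omega
      · subst heq
        have hM : hi ≤ t.foldl max hi := (PySem.List.le_foldl_max t hi).1
        have hstep : fhpStep (some (hi, c)) hi = some (hi, c + 1) := by simp [fhpStep]
        simp only [List.foldl_cons, hstep, ih, max_self, List.count_cons, beq_iff_eq,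
          Option.some.injEq, Prod.mk.injEq]
        refine ⟨trivial, ?_⟩
        split_ifs <;> push_cast <;> omega
      · have hM : hi ≤ t.foldl max hi := (PySem.List.le_foldl_max t hi).1
        have hstep : fhpStep (some (hi, c)) x = some (hi, c) := by
          have h1 : ¬ x > hi := by omega
          have h2 : ¬ x = hi := by omega
          simp [fhpStep, h1, h2]
        have hmax : max hi x = hi := max_eq_left hgt.le
        simp only [List.foldl_cons, hstep, ih, hmax, List.count_cons, beq_iff_eq,
          Option.some.injEq, Prod.mk.injEq]
        refine ⟨trivial, ?_⟩
        split_ifs <;> push_cast <;> omega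

-- A's "max of the peaks list then count it" = B's finalized accumulator, for the same peaks list
theorem fhp_finalize (p : List Int) :
    (match PySem.List.max? p (fun x => x) with
     | some m => ((PySem.List.count p m : Int), List.replicate (PySem.List.count p m) m)
     | none => ((0 : Int), ([] : List Int)))
    = (match p.foldl fhpStep none with
       | none => ((0 : Int), ([] : List Int))
       | some (hi, c) => (c, List.replicate c.toNat hi)) := by
  cases p with
  | nil => simp [PySem.List.max?]
  | cons x t =>
      rw [PySem.List.max?_id_cons]
      have hB : (x :: t).foldl fhpStep none = t.foldl fhpStep (some (x, 1)) := by
        simp [fhpStep]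
      rw [hB, fhpStep_run]
      have hxM : x ≤ t.foldl max x := (PySem.List.le_foldl_max t x).1
      have hc : (if t.foldl max x = x then (1 : Int) else 0) + (t.count (t.foldl max x) : Int)
          = ((x :: t).count (t.foldl max x) : Int) := by
        simp only [List.count_cons, beq_iff_eq]
        split_ifs <;> push_cast <;> omega
      rw [hc]
      simp [PySem.List.count_eq]

-- ===== VERDICT (by name: the statement is the Claim_ definition above) =====
theorem find_highest_peaks_spec : Claim_equal_find_highest_peaks := by
  intro heights _ _
  show find_highest_peaks heights = find_highest_peaks_alt heights
  unfold find_highest_peaks find_highest_peaks_alt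
  simp only []
  rw [PySem.List.foldl_append_ite, fhp_foldl_if_step, List.nil_append]
  exact fhp_finalize _
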